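-- pv_equiv track=rewrite | github.com/JeevanHaris/real-time-disaster-information-aggergation-system | disaster_backend_real.py | extract_disaster_type_from_gdacs
-- ===== SOURCE A (Python) =====
-- def extract_disaster_type_from_gdacs(title: str) -> str:
--     """Extract disaster type from GDACS title."""
--     title_lower = title.lower()
--
--     if any(word in title_lower for word in ['earthquake', 'quake']):
--         return 'earthquake'
--     elif any(word in title_lower for word in ['flood', 'flooding']):
--         return 'flood'
--     elif any(word in title_lower for word in ['cyclone', 'hurricane', 'typhoon', 'storm']):
--         return 'cyclone'
--     elif any(word in title_lower for word in ['wildfire', 'fire']):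
--         return 'wildfire'
--     elif any(word in title_lower for word in ['drought']):
--         return 'drought'
--     elif any(word in title_lower for word in ['volcano', 'volcanic']):
--         return 'volcano'
--     else:
--         return 'other'
-- ===== SOURCE B (Python) =====
-- # Single left-to-right scan of the title: at each position, mark every keyword
-- # that starts there in a 'found' set (keyword -> type via one flat dict), then
-- # pick the highest-priority matched type. No per-keyword substring searches.
-- KEYWORD_TYPE = {
--     'earthquake': 'earthquake', 'quake': 'earthquake',
--     'flood': 'flood', 'flooding': 'flood',
--     'cyclone': 'cyclone', 'hurricane': 'cyclone', 'typhoon': 'cyclone', 'storm': 'cyclone',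
--     'wildfire': 'wildfire', 'fire': 'wildfire',
--     'drought': 'drought',
--     'volcano': 'volcano', 'volcanic': 'volcano',
-- }
--
-- PRIORITY = ['earthquake', 'flood', 'cyclone', 'wildfire', 'drought', 'volcano']
--
-- def extract_disaster_type_from_gdacs(title: str) -> str:
--     t = title.lower()
--     found = set()
--     for i in range(len(t)):
--         for kw, dtype in KEYWORD_TYPE.items():
--             if t.startswith(kw, i):
--                 found.add(dtype)
--     for dtype in PRIORITY:
--         if dtype in found:
--             return dtype
--     return 'other'
-- ===== Notes on version B (the rewrite author's own statement) =====
-- stated objective: alternative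
-- what changed: Replaced A's per-keyword substring tests in an if/elif chain by a single left-to-right scan of the title that marks, at each position, every keyword starting there (flat keyword-to-type dict) into a set, followed by one priority-ordered selection pass.
import Mathlib
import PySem

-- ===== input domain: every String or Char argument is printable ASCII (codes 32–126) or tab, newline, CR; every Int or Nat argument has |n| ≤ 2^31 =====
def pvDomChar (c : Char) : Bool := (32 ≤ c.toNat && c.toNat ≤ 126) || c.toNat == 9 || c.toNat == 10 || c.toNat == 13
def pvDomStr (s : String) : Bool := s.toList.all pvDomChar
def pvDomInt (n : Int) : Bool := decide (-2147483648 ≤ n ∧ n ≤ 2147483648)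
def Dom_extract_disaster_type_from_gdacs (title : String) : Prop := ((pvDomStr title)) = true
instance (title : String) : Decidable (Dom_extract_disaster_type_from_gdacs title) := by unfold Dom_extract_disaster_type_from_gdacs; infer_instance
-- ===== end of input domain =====

-- B replaces A's per-keyword substring tests in an if/elif chain by one left-to-right
-- scan of the title marking every keyword that starts at each position into a set,
-- then a priority-ordered selection pass; same results, different traversal (alternative).

-- ===== PORT A =====
def extract_disaster_type_from_gdacs (title : String) : String :=
  let title_lower := PySem.Str.lower title
  if ["earthquake", "quake"].any (fun word => PySem.Str.isIn word title_lower) then "earthquake"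
  else if ["flood", "flooding"].any (fun word => PySem.Str.isIn word title_lower) then "flood"
  else if ["cyclone", "hurricane", "typhoon", "storm"].any (fun word => PySem.Str.isIn word title_lower) then "cyclone"
  else if ["wildfire", "fire"].any (fun word => PySem.Str.isIn word title_lower) then "wildfire"
  else if ["drought"].any (fun word => PySem.Str.isIn word title_lower) then "drought"
  else if ["volcano", "volcanic"].any (fun word => PySem.Str.isIn word title_lower) then "volcano"
  else "other"

-- ===== PORT B =====
-- KEYWORD_TYPE.items() in insertion order (a dict literal with distinct keys)
def pvKeywordType : List (String × String) :=
  [("earthquake", "earthquake"), ("quake", "earthquake"),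
   ("flood", "flood"), ("flooding", "flood"),
   ("cyclone", "cyclone"), ("hurricane", "cyclone"), ("typhoon", "cyclone"), ("storm", "cyclone"),
   ("wildfire", "wildfire"), ("fire", "wildfire"),
   ("drought", "drought"),
   ("volcano", "volcano"), ("volcanic", "volcano")]

def pvPriority : List String := ["earthquake", "flood", "cyclone", "wildfire", "drought", "volcano"]

-- inner loop: t.startswith(kw, i) for every dict entry, adding the matched types
def pvMarkAt (s : List Char) (found : PySem.Set String) : PySem.Set String :=
  pvKeywordType.foldl (fun f p => if p.1.toList.isPrefixOf s then PySem.Set.add f p.2 else f) found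

-- outer loop: for i in range(len(t)) — walk the successive suffixes of t
def pvScan : List Char → PySem.Set String → PySem.Set String
  | [], found => found
  | c :: rest, found => pvScan rest (pvMarkAt (c :: rest) found)

-- final loop: first type of PRIORITY present in found, else 'other'
def pvPick (found : PySem.Set String) : List String → String
  | [] => "other"
  | d :: rest => if PySem.Set.contains found d then d else pvPick found rest

def extract_disaster_type_from_gdacs_alt (title : String) : String :=
  pvPick (pvScan (PySem.Chars.lower title.toList) PySem.Set.empty) pvPriority

-- ===== PRECONDITION & SPEC =====
def Spec_extract_disaster_type_from_gdacs (title : String) (out : String) : Prop := out = extract_disaster_type_from_gdacs_alt title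
instance (title : String) (out : String) : Decidable (Spec_extract_disaster_type_from_gdacs title out) := by unfold Spec_extract_disaster_type_from_gdacs; infer_instance

-- ===== CLAIM (what is proved, stated in full; the proofs are below) =====
def Claim_equal_extract_disaster_type_from_gdacs : Prop := ∀ (title : String), Dom_extract_disaster_type_from_gdacs title → Spec_extract_disaster_type_from_gdacs title (extract_disaster_type_from_gdacs title)

-- ===== LEMMAS AND PROOFS =====

-- membership in the inner-loop fold: found plus the types of table keywords prefixing s
lemma pv_mem_foldl (l : List (String × String)) (s : List Char) (found : PySem.Set String) (dt : String) :
    dt ∈ l.foldl (fun f p => if p.1.toList.isPrefixOf s then PySem.Set.add f p.2 else f) found ↔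
      dt ∈ found ∨ ∃ p ∈ l, p.1.toList <+: s ∧ p.2 = dt := by
  induction l generalizing found with
  | nil => simp
  | cons p l ih =>
    rw [List.foldl_cons, ih]
    by_cases h : p.1.toList <+: s
    · simp [h, List.isPrefixOf_iff_prefix, PySem.Set.mem_add]
      tauto
    · simp [h, (List.isPrefixOf_iff_prefix).not.mpr h]

lemma pv_mem_markAt (s : List Char) (found : PySem.Set String) (dt : String) :
    dt ∈ pvMarkAt s found ↔
      dt ∈ found ∨ ∃ p ∈ pvKeywordType, p.1.toList <+: s ∧ p.2 = dt :=
  pv_mem_foldl _ s found dt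

-- membership after the whole scan: the types of table keywords occurring anywhere in s
lemma pv_mem_scan (s : List Char) (found : PySem.Set String) (dt : String) :
    dt ∈ pvScan s found ↔
      dt ∈ found ∨ ∃ p ∈ pvKeywordType, p.1.toList <:+: s ∧ p.2 = dt := by
  induction s generalizing found with
  | nil =>
    simp only [pvScan, List.infix_nil]
    constructor
    · tauto
    · rintro (h | ⟨p, hp, h1, h2⟩)
      · exact h
      · fin_cases hp <;> simp_all
  | cons c rest ih =>
    rw [pvScan, ih, pv_mem_markAt]
    simp only [List.infix_cons_iff]
    constructor
    · rintro ((h | ⟨p, hp, h1, h2⟩) | ⟨p, hp, h1, h2⟩)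
      · tauto
      · exact Or.inr ⟨p, hp, Or.inl h1, h2⟩
      · exact Or.inr ⟨p, hp, Or.inr h1, h2⟩
    · rintro (h | ⟨p, hp, (h1 | h1), h2⟩)
      · tauto
      · exact Or.inl (Or.inr ⟨p, hp, h1, h2⟩)
      · exact Or.inr ⟨p, hp, h1, h2⟩

-- B's membership test for type dt equals A's any-test over dt's keyword list ws
lemma pv_contains_scan (title : String) (ws : List String) (dt : String)
    (hw : ws.all (fun w => decide ((w, dt) ∈ pvKeywordType)) = true)
    (hk : ∀ p ∈ pvKeywordType, p.2 = dt → p.1 ∈ ws) :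
    PySem.Set.contains (pvScan (PySem.Chars.lower title.toList) PySem.Set.empty) dt
      = ws.any (fun word => PySem.Str.isIn word (PySem.Str.lower title)) := by
  rw [Bool.eq_iff_iff, PySem.Set.contains_iff, pv_mem_scan]
  simp only [PySem.Set.empty, List.not_mem_nil, false_or, List.any_eq_true,
    PySem.Str.isIn_iff_infix, PySem.Str.toList_lower]
  constructor
  · rintro ⟨p, hp, h1, h2⟩
    exact ⟨p.1, hk p hp h2, h1⟩
  · rintro ⟨w, hw', h1⟩
    have := List.all_eq_true.mp hw w hw'
    exact ⟨(w, dt), by simpa using this, h1, rfl⟩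

-- ===== VERDICT (by name: the statement is the Claim_ definition above) =====
theorem extract_disaster_type_from_gdacs_spec : Claim_equal_extract_disaster_type_from_gdacs := by
  intro title _
  unfold Spec_extract_disaster_type_from_gdacs
  unfold extract_disaster_type_from_gdacs extract_disaster_type_from_gdacs_alt
  simp only [pvPriority, pvPick]
  rw [pv_contains_scan title ["earthquake", "quake"] "earthquake" (by decide) (by decide),
      pv_contains_scan title ["flood", "flooding"] "flood" (by decide) (by decide),
      pv_contains_scan title ["cyclone", "hurricane", "typhoon", "storm"] "cyclone" (by decide) (by decide),
      pv_contains_scan title ["wildfire", "fire"] "wildfire" (by decide) (by decide),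
      pv_contains_scan title ["drought"] "drought" (by decide) (by decide),
      pv_contains_scan title ["volcano", "volcanic"] "volcano" (by decide) (by decide)]
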